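-- pv_equiv track=rewrite | github.com/smitha13798/bomberman_rl | agent_code/dqn_age4/features.py | calculate_danger_zone
-- ===== SOURCE A (Python) =====
-- def calculate_danger_zone(bombs, blast_radius=3):
--     danger_zone = set()
--     urgent_danger_zone = set()  # Track areas where bombs will explode soon
--
--     for bomb in bombs:
--         bomb_position, timer = bomb[0], bomb[1]  # Unpack bomb position and timer
--
--         x, y = bomb_position
--         # Add positions within the blast radius to the danger zone
--         for i in range(-blast_radius, blast_radius + 1):
--             if 0 <= x + i < 15:  # Assuming the arena size is 15x15
--                 danger_zone.add((x + i, y))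
--                 if timer < 3:  # If bomb will explode soon, mark it as urgent
--                     urgent_danger_zone.add((x + i, y))
--             if 0 <= y + i < 15:
--                 danger_zone.add((x, y + i))
--                 if timer < 3:
--                     urgent_danger_zone.add((x, y + i))
--
--     return danger_zone, urgent_danger_zone  # Return both general and urgent danger zones
-- ===== SOURCE B (Python) =====
-- def calculate_danger_zone(bombs, blast_radius=3):
--     # Divide and conquer: a single bomb's zones are computed directly; for several
--     # bombs the list is split in half, each half solved recursively, and the two
--     # answers are combined by set union.
--     n = len(bombs)
--     if n == 0:
--         return set(), set()
--     if n == 1: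
--         (x, y), timer = bombs[0][0], bombs[0][1]
--         cells = set()
--         for i in range(-blast_radius, blast_radius + 1):
--             if 0 <= x + i < 15:
--                 cells.add((x + i, y))
--             if 0 <= y + i < 15:
--                 cells.add((x, y + i))
--         return cells, cells if timer < 3 else set()
--     mid = n // 2
--     left_danger, left_urgent = calculate_danger_zone(bombs[:mid], blast_radius)
--     right_danger, right_urgent = calculate_danger_zone(bombs[mid:], blast_radius)
--     return left_danger | right_danger, left_urgent | right_urgent
-- ===== Notes on version B (the rewrite author's own statement) =====
-- stated objective: alternative
-- what changed: Replaces A's fused accumulator loop over bombs (threading both sets through every bomb) with a divide-and-conquer recursion: a one-bomb base case computes its cross set once, and the two half-lists' answers are combined by set union.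
import Mathlib
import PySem

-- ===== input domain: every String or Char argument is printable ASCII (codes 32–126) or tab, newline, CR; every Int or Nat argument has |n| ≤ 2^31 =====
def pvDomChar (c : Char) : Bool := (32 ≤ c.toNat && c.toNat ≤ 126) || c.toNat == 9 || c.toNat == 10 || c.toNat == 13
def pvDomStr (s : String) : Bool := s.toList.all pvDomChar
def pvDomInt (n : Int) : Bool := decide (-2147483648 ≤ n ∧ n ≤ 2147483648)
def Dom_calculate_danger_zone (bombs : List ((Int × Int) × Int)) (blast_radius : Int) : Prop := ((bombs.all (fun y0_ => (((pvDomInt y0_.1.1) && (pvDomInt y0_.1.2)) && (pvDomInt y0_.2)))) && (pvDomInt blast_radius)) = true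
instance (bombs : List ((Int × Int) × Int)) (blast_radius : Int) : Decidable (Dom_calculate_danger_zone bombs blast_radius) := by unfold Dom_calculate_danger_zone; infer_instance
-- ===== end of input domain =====

-- B replaces A's fused accumulator loop over bombs with a divide-and-conquer
-- recursion combining half-answers by set union; objective: alternative.

-- ===== PORT A =====
def calculate_danger_zone (bombs : List ((Int × Int) × Int)) (blast_radius : Int) : (List (Int × Int)) × (List (Int × Int)) :=
  bombs.foldl (fun st bomb =>
    let x := bomb.1.1
    let y := bomb.1.2
    let timer := bomb.2
    (PySem.List.pyRange (-blast_radius) (blast_radius + 1) 1).foldl (fun st i =>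
      let st := if 0 ≤ x + i ∧ x + i < 15 then
          (PySem.Set.add st.1 (x + i, y),
           if timer < 3 then PySem.Set.add st.2 (x + i, y) else st.2)
        else st
      if 0 ≤ y + i ∧ y + i < 15 then
          (PySem.Set.add st.1 (x, y + i),
           if timer < 3 then PySem.Set.add st.2 (x, y + i) else st.2)
        else st) st) (PySem.Set.empty, PySem.Set.empty)

-- ===== PORT B =====
-- (bombs[:mid] / bombs[mid:] with 0 ≤ mid ≤ len are exactly List.take / List.drop)
def calculate_danger_zone_alt (bombs : List ((Int × Int) × Int)) (blast_radius : Int) : (List (Int × Int)) × (List (Int × Int)) :=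
  match bombs with
  | [] => (PySem.Set.empty, PySem.Set.empty)
  | [bomb] =>
    let x := bomb.1.1
    let y := bomb.1.2
    let timer := bomb.2
    let cells := (PySem.List.pyRange (-blast_radius) (blast_radius + 1) 1).foldl (fun cells i =>
      let cells := if 0 ≤ x + i ∧ x + i < 15 then PySem.Set.add cells (x + i, y) else cells
      if 0 ≤ y + i ∧ y + i < 15 then PySem.Set.add cells (x, y + i) else cells) PySem.Set.empty
    (cells, if timer < 3 then cells else PySem.Set.empty)
  | b1 :: b2 :: rest =>
    let mid := (b1 :: b2 :: rest).length / 2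
    let l := calculate_danger_zone_alt ((b1 :: b2 :: rest).take mid) blast_radius
    let r := calculate_danger_zone_alt ((b1 :: b2 :: rest).drop mid) blast_radius
    (PySem.Set.union l.1 r.1, PySem.Set.union l.2 r.2)
termination_by bombs.length
decreasing_by
  · simp [List.length_take]; omega
  · simp; omega

-- ===== PRECONDITION & SPEC =====
def Spec_calculate_danger_zone (bombs : List ((Int × Int) × Int)) (blast_radius : Int) (out : (List (Int × Int)) × (List (Int × Int))) : Prop := out = calculate_danger_zone_alt bombs blast_radius
instance (bombs : List ((Int × Int) × Int)) (blast_radius : Int) (out : (List (Int × Int)) × (List (Int × Int))) : Decidable (Spec_calculate_danger_zone bombs blast_radius out) := by unfold Spec_calculate_danger_zone; infer_instance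

-- ===== CLAIM (what is proved, stated in full; the proofs are below) =====
def Claim_equal_calculate_danger_zone : Prop := ∀ (bombs : List ((Int × Int) × Int)) (blast_radius : Int), Dom_calculate_danger_zone bombs blast_radius → Spec_calculate_danger_zone bombs blast_radius (calculate_danger_zone bombs blast_radius)

-- ===== LEMMAS AND PROOFS =====

-- Adding a built set's elements = adding the underlying insertions after it.
theorem update_add {α : Type} [BEq α] [LawfulBEq α] (d s : PySem.Set α) (x : α) :
    PySem.Set.update d (PySem.Set.add s x) = PySem.Set.add (PySem.Set.update d s) x := by
  by_cases h : x ∈ s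
  · rw [PySem.Set.add_of_mem h, PySem.Set.add_of_mem ((PySem.Set.mem_update _ _ _).mpr (Or.inr h))]
  · rw [PySem.Set.add_of_not_mem h, PySem.Set.update_append]
    rfl

theorem update_update {α : Type} [BEq α] [LawfulBEq α] :
    ∀ (l : List α) (d s : PySem.Set α),
      PySem.Set.update d (PySem.Set.update s l) = PySem.Set.update (PySem.Set.update d s) l := by
  intro l
  induction l with
  | nil => intro d s; rfl
  | cons x l ih =>
    intro d s
    rw [PySem.Set.update_cons, PySem.Set.update_cons, ih, update_add]

-- A fold whose step updates the two components independently splits into two folds.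
theorem foldl_prod_split {α β γ : Type} (f : α × β → γ → α × β)
    (fa : α → γ → α) (fb : β → γ → β)
    (h : ∀ st c, f st c = (fa st.1 c, fb st.2 c)) :
    ∀ (l : List γ) (st : α × β), l.foldl f st = (l.foldl fa st.1, l.foldl fb st.2) := by
  intro l
  induction l with
  | nil => intro st; simp
  | cons c t ih => intro st; simp [List.foldl_cons, h st c, ih]

theorem foldl_flatMap_add {γ : Type} (g : γ → List (Int × Int)) :
    ∀ (l : List γ) (d : PySem.Set (Int × Int)),
      (l.flatMap g).foldl PySem.Set.add d = l.foldl (fun d i => (g i).foldl PySem.Set.add d) d := by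
  intro l
  induction l with
  | nil => intro d; simp
  | cons c t ih => intro d; simp [List.flatMap_cons, List.foldl_append, ih]

-- the flat cell sequence of one bomb's cross, in A's insertion order
def flatCross (x y r : Int) : List (Int × Int) :=
  (PySem.List.pyRange (-r) (r + 1) 1).flatMap (fun i =>
    (if 0 ≤ x + i ∧ x + i < 15 then [(x + i, y)] else [])
      ++ (if 0 ≤ y + i ∧ y + i < 15 then [(x, y + i)] else []))

-- the danger-zone step of A's inner loop (also B's cells loop)
def stepD (x y : Int) (d : PySem.Set (Int × Int)) (i : Int) : PySem.Set (Int × Int) :=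
  let d := if 0 ≤ x + i ∧ x + i < 15 then PySem.Set.add d (x + i, y) else d
  if 0 ≤ y + i ∧ y + i < 15 then PySem.Set.add d (x, y + i) else d

-- the urgent-zone step of A's inner loop
def stepU (x y timer : Int) (u : PySem.Set (Int × Int)) (i : Int) : PySem.Set (Int × Int) :=
  let u := if 0 ≤ x + i ∧ x + i < 15 then (if timer < 3 then PySem.Set.add u (x + i, y) else u) else u
  if 0 ≤ y + i ∧ y + i < 15 then (if timer < 3 then PySem.Set.add u (x, y + i) else u) else u

theorem foldl_stepD (x y r : Int) (d : PySem.Set (Int × Int)) :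
    (PySem.List.pyRange (-r) (r + 1) 1).foldl (stepD x y) d
      = PySem.Set.update d (flatCross x y r) := by
  show _ = (flatCross x y r).foldl PySem.Set.add d
  rw [flatCross, foldl_flatMap_add]
  refine (PySem.List.foldl_congr_mem _ _ _ _ (fun d i _ => ?_)).symm
  unfold stepD
  split_ifs <;> simp [List.foldl]

theorem stepU_eq (x y timer : Int) :
    ∀ u i, stepU x y timer u i = if timer < 3 then stepD x y u i else u := by
  intro u i
  unfold stepU stepD
  split_ifs <;> rfl

theorem foldl_stepU (x y timer r : Int) (u : PySem.Set (Int × Int)) :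
    (PySem.List.pyRange (-r) (r + 1) 1).foldl (stepU x y timer) u
      = if timer < 3 then PySem.Set.update u (flatCross x y r) else u := by
  rw [← foldl_stepD]
  by_cases h : timer < 3
  · simp only [h, if_true]
    exact PySem.List.foldl_congr_mem _ _ _ _ (fun u i _ => by rw [stepU_eq]; simp [h])
  · simp only [h, if_false]
    induction (PySem.List.pyRange (-r) (r + 1) 1) generalizing u with
    | nil => rfl
    | cons c t ih => simp [List.foldl_cons, stepU_eq, h, ih]

-- A's per-bomb outer step, named
def stepA (r : Int) (st : PySem.Set (Int × Int) × PySem.Set (Int × Int))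
    (bomb : (Int × Int) × Int) : PySem.Set (Int × Int) × PySem.Set (Int × Int) :=
  (PySem.List.pyRange (-r) (r + 1) 1).foldl (fun st i =>
    let st := if 0 ≤ bomb.1.1 + i ∧ bomb.1.1 + i < 15 then
        (PySem.Set.add st.1 (bomb.1.1 + i, bomb.1.2),
         if bomb.2 < 3 then PySem.Set.add st.2 (bomb.1.1 + i, bomb.1.2) else st.2)
      else st
    if 0 ≤ bomb.1.2 + i ∧ bomb.1.2 + i < 15 then
        (PySem.Set.add st.1 (bomb.1.1, bomb.1.2 + i),
         if bomb.2 < 3 then PySem.Set.add st.2 (bomb.1.1, bomb.1.2 + i) else st.2)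
      else st) st

theorem stepA_eq (r : Int) (st : PySem.Set (Int × Int) × PySem.Set (Int × Int))
    (bomb : (Int × Int) × Int) :
    stepA r st bomb
      = (PySem.Set.update st.1 (flatCross bomb.1.1 bomb.1.2 r),
         if bomb.2 < 3 then PySem.Set.update st.2 (flatCross bomb.1.1 bomb.1.2 r) else st.2) := by
  unfold stepA
  rw [foldl_prod_split _ (stepD bomb.1.1 bomb.1.2) (stepU bomb.1.1 bomb.1.2 bomb.2)
    (fun st i => by unfold stepD stepU; split_ifs <;> rfl)]
  rw [foldl_stepD, foldl_stepU]

-- The main invariant: A's left fold from any pair of sets equals updating them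
-- with B's divide-and-conquer answers.
theorem main_inv : ∀ (n : Nat) (bombs : List ((Int × Int) × Int)) (r : Int)
    (d u : PySem.Set (Int × Int)), bombs.length ≤ n →
    bombs.foldl (stepA r) (d, u)
      = (PySem.Set.update d (calculate_danger_zone_alt bombs r).1,
         PySem.Set.update u (calculate_danger_zone_alt bombs r).2) := by
  intro n
  induction n with
  | zero =>
    intro bombs r d u h
    have : bombs = [] := List.length_eq_zero_iff.mp (Nat.le_zero.mp h)
    subst this
    simp only [calculate_danger_zone_alt, List.foldl_nil]
    rfl
  | succ n ih =>
    intro bombs r d u h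
    match bombs with
    | [] => simp only [calculate_danger_zone_alt, List.foldl_nil]; rfl
    | [bomb] =>
      rw [List.foldl_cons, List.foldl_nil, stepA_eq]
      have hc : (calculate_danger_zone_alt [bomb] r)
          = (PySem.Set.update PySem.Set.empty (flatCross bomb.1.1 bomb.1.2 r),
             if bomb.2 < 3 then PySem.Set.update PySem.Set.empty (flatCross bomb.1.1 bomb.1.2 r)
             else PySem.Set.empty) := by
        simp only [calculate_danger_zone_alt]
        rw [show ((PySem.List.pyRange (-r) (r + 1) 1).foldl (fun cells i =>
              let cells := if 0 ≤ bomb.1.1 + i ∧ bomb.1.1 + i < 15 then PySem.Set.add cells (bomb.1.1 + i, bomb.1.2) else cells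
              if 0 ≤ bomb.1.2 + i ∧ bomb.1.2 + i < 15 then PySem.Set.add cells (bomb.1.1, bomb.1.2 + i) else cells) PySem.Set.empty)
            = (PySem.List.pyRange (-r) (r + 1) 1).foldl (stepD bomb.1.1 bomb.1.2) PySem.Set.empty from rfl]
        rw [foldl_stepD bomb.1.1 bomb.1.2 r PySem.Set.empty]
      rw [hc]
      by_cases ht : bomb.2 < 3 <;> simp only [ht, if_true, if_false]
      · rw [update_update, update_update]; rfl
      · rw [update_update]; rfl
    | b1 :: b2 :: rest =>
      have hsplit := List.take_append_drop ((b1 :: b2 :: rest).length / 2) (b1 :: b2 :: rest)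
      have hlen : (b1 :: b2 :: rest).length ≤ n + 1 := h
      have hlt : ((b1 :: b2 :: rest).take ((b1 :: b2 :: rest).length / 2)).length ≤ n ∧
          ((b1 :: b2 :: rest).drop ((b1 :: b2 :: rest).length / 2)).length ≤ n := by
        simp only [List.length_take, List.length_drop, List.length_cons] at *
        omega
      conv_lhs => rw [← hsplit]
      rw [List.foldl_append, ih _ r d u hlt.1, ih _ r _ _ hlt.2]
      have halt : calculate_danger_zone_alt (b1 :: b2 :: rest) r
          = (PySem.Set.union (calculate_danger_zone_alt ((b1 :: b2 :: rest).take ((b1 :: b2 :: rest).length / 2)) r).1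
               (calculate_danger_zone_alt ((b1 :: b2 :: rest).drop ((b1 :: b2 :: rest).length / 2)) r).1,
             PySem.Set.union (calculate_danger_zone_alt ((b1 :: b2 :: rest).take ((b1 :: b2 :: rest).length / 2)) r).2
               (calculate_danger_zone_alt ((b1 :: b2 :: rest).drop ((b1 :: b2 :: rest).length / 2)) r).2) := by
        rw [calculate_danger_zone_alt]
      rw [halt]
      show (_, _) = (_, _)
      congr 1 <;> exact (update_update _ _ _).symm

theorem nodup_alt : ∀ (n : Nat) (bombs : List ((Int × Int) × Int)) (r : Int),
    bombs.length ≤ n →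
    (calculate_danger_zone_alt bombs r).1.Nodup ∧ (calculate_danger_zone_alt bombs r).2.Nodup := by
  intro n
  induction n with
  | zero =>
    intro bombs r h
    have : bombs = [] := List.length_eq_zero_iff.mp (Nat.le_zero.mp h)
    subst this
    simp only [calculate_danger_zone_alt]
    exact ⟨List.nodup_nil, List.nodup_nil⟩
  | succ n ih =>
    intro bombs r h
    match bombs with
    | [] =>
      simp only [calculate_danger_zone_alt]
      exact ⟨List.nodup_nil, List.nodup_nil⟩
    | [bomb] =>
      have hcells : ((PySem.List.pyRange (-r) (r + 1) 1).foldl (stepD bomb.1.1 bomb.1.2)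
          PySem.Set.empty).Nodup := by
        rw [foldl_stepD]
        exact PySem.Set.nodup_update _ _ List.nodup_nil
      simp only [calculate_danger_zone_alt]
      constructor
      · exact hcells
      · split_ifs
        · exact hcells
        · exact List.nodup_nil
    | b1 :: b2 :: rest =>
      have hlt : ((b1 :: b2 :: rest).take ((b1 :: b2 :: rest).length / 2)).length ≤ n ∧
          ((b1 :: b2 :: rest).drop ((b1 :: b2 :: rest).length / 2)).length ≤ n := by
        simp only [List.length_take, List.length_drop, List.length_cons] at *
        omega
      have hl := ih _ r hlt.1
      have hr := ih _ r hlt.2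
      rw [calculate_danger_zone_alt]
      exact ⟨PySem.Set.nodup_union _ _ hl.1, PySem.Set.nodup_union _ _ hl.2⟩

-- ===== VERDICT (by name: the statement is the Claim_ definition above) =====
theorem calculate_danger_zone_spec : Claim_equal_calculate_danger_zone := by
  intro bombs blast_radius _
  show calculate_danger_zone bombs blast_radius = calculate_danger_zone_alt bombs blast_radius
  have hA : calculate_danger_zone bombs blast_radius
      = bombs.foldl (stepA blast_radius) (PySem.Set.empty, PySem.Set.empty) := rfl
  rw [hA, main_inv bombs.length bombs blast_radius _ _ le_rfl]
  have hn := nodup_alt bombs.length bombs blast_radius le_rfl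
  rw [show (PySem.Set.empty : PySem.Set (Int × Int)).update
        (calculate_danger_zone_alt bombs blast_radius).1
      = PySem.Set.ofList (calculate_danger_zone_alt bombs blast_radius).1 from rfl,
     show (PySem.Set.empty : PySem.Set (Int × Int)).update
        (calculate_danger_zone_alt bombs blast_radius).2
      = PySem.Set.ofList (calculate_danger_zone_alt bombs blast_radius).2 from rfl,
     PySem.Set.ofList_eq_self_of_nodup _ hn.1, PySem.Set.ofList_eq_self_of_nodup _ hn.2]
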